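-- pv_equiv track=rewrite | github.com/ybaudouin/Piscine_Django | Django_0/ex05/all_in.py | find_capital
-- ===== SOURCE A (Python) =====
-- def find_capital(w):
--
-- 	states = {
-- 		"Oregon" : "OR",
-- 		"Alabama" : "AL",
-- 		"New Jersey": "NJ",
-- 		"Colorado" : "CO"
-- 	}
--
-- 	capital_cities = {
-- 		"OR": "Salem",
-- 		"AL": "Montgomery",
-- 		"NJ": "Trenton",
-- 		"CO": "Denver"
-- 	}
--
-- 	w = w.strip()
-- 	if w == "":
-- 		return
-- 	for states_keys, states_values in states.items():
-- 		if states_keys.lower() == w.lower():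
-- 			capital = capital_cities[states_values]
-- 			return f"{capital} is the capital of {states_keys}"
-- 	for capital_keys, capital_values in capital_cities.items():
-- 		if capital_values.lower() == w.lower():
-- 			for states_keys, states_values in states.items():
-- 				if capital_keys == states_values:
-- 					return f"{capital_values} is the capital of {states_keys}"
-- 	return f"{w} is neither a capital city nor a state"
-- ===== SOURCE B (Python) =====
-- def find_capital(w):
--     states = {
--         "Oregon": "OR",
--         "Alabama": "AL",
--         "New Jersey": "NJ",
--         "Colorado": "CO"
--     }
--     capital_cities = {
--         "OR": "Salem",
--         "AL": "Montgomery",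
--         "NJ": "Trenton",
--         "CO": "Denver"
--     }
--     table = {}
--     for state, ab in states.items():
--         capital = capital_cities[ab]
--         msg = f"{capital} is the capital of {state}"
--         table[state.lower()] = msg
--         table[capital.lower()] = msg
--     w = w.strip()
--     if w == "":
--         return
--     return table.get(w.lower(), f"{w} is neither a capital city nor a state")
-- ===== Notes on version B (the rewrite author's own statement) =====
-- stated objective: simpler
-- what changed: Replaces A's two sequential scans and nested abbreviation-matching loop with one prebuilt lowercase-key table (joined from the two dicts) and a single dict .get lookup.
import Mathlib
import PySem

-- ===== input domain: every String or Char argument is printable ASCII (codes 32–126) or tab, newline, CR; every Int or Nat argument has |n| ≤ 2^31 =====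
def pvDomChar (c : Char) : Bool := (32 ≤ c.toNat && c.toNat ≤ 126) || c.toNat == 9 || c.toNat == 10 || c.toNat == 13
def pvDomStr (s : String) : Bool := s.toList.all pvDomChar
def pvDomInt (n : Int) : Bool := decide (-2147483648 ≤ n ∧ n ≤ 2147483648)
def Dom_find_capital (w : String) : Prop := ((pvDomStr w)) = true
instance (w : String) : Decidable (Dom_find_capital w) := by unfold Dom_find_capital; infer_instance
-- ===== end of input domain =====

-- B replaces A's two sequential case-insensitive scans (with a nested abbreviation-matching
-- loop) by one prebuilt lowercase-keyed table and a single lookup; objective: simpler.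

-- ===== PORT A =====
def pvStates : PySem.Dict String String :=
  PySem.Dict.mk [("Oregon","OR"),("Alabama","AL"),("New Jersey","NJ"),("Colorado","CO")]

def pvCaps : PySem.Dict String String :=
  PySem.Dict.mk [("OR","Salem"),("AL","Montgomery"),("NJ","Trenton"),("CO","Denver")]

-- first for-loop of A: scan states.items(); the key states_values is always present in
-- capital_cities, so the KeyError branch of `capital_cities[states_values]` is unreachable
-- and ported as getD "".
def pvLoop1 (ws : String) : List (String × String) → Option String
  | [] => none
  | (sk, sv) :: rest =>
    if PySem.Str.lower sk = PySem.Str.lower ws then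
      some ((PySem.Dict.getD pvCaps sv "") ++ " is the capital of " ++ sk)
    else pvLoop1 ws rest

-- inner for-loop of A's second loop: scan states.items() for the matching abbreviation
def pvInner (ck cv : String) : List (String × String) → Option String
  | [] => none
  | (sk, sv) :: rest =>
    if ck = sv then some (cv ++ " is the capital of " ++ sk) else pvInner ck cv rest

-- second for-loop of A: scan capital_cities.items()
def pvLoop2 (ws : String) : List (String × String) → Option String
  | [] => none
  | (ck, cv) :: rest =>
    if PySem.Str.lower cv = PySem.Str.lower ws then
      match pvInner ck cv pvStates.items with
      | some r => some r
      | none => pvLoop2 ws rest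
    else pvLoop2 ws rest

def find_capital (w : String) : Option String :=
  let ws := PySem.Str.strip w
  if ws = "" then none
  else
    match pvLoop1 ws pvStates.items with
    | some r => some r
    | none =>
      match pvLoop2 ws pvCaps.items with
      | some r => some r
      | none => some (ws ++ " is neither a capital city nor a state")

-- ===== PORT B =====
-- build the lowercase-keyed message table once (B's for-loop over states.items())
def pvTable : PySem.Dict String String :=
  pvStates.items.foldl
    (fun t p =>
      let capital := PySem.Dict.getD pvCaps p.2 ""
      let msg := capital ++ " is the capital of " ++ p.1
      PySem.Dict.insert (PySem.Dict.insert t (PySem.Str.lower p.1) msg) (PySem.Str.lower capital) msg)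
    PySem.Dict.empty

def find_capital_alt (w : String) : Option String :=
  let ws := PySem.Str.strip w
  if ws = "" then none
  else some (PySem.Dict.getD pvTable (PySem.Str.lower ws)
              (ws ++ " is neither a capital city nor a state"))

-- ===== PRECONDITION & SPEC =====
def Spec_find_capital (w : String) (out : Option String) : Prop := out = find_capital_alt w
instance (w : String) (out : Option String) : Decidable (Spec_find_capital w out) := by unfold Spec_find_capital; infer_instance

-- ===== CLAIM (what is proved, stated in full; the proofs are below) =====
def Claim_equal_find_capital : Prop := ∀ (w : String), Dom_find_capital w → Spec_find_capital w (find_capital w)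

-- ===== LEMMAS AND PROOFS =====

-- core equivalence, for an arbitrary already-stripped nonempty string
lemma pv_core_eq (ws : String) :
    (match pvLoop1 ws pvStates.items with
     | some r => some r
     | none =>
       match pvLoop2 ws pvCaps.items with
       | some r => some r
       | none => some (ws ++ " is neither a capital city nor a state")) =
    some (PySem.Dict.getD pvTable (PySem.Str.lower ws)
            (ws ++ " is neither a capital city nor a state")) := by
  have e1 : PySem.Str.lower "Oregon" = "oregon" := by decide
  have e2 : PySem.Str.lower "Alabama" = "alabama" := by decide
  have e3 : PySem.Str.lower "New Jersey" = "new jersey" := by decide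
  have e4 : PySem.Str.lower "Colorado" = "colorado" := by decide
  have e5 : PySem.Str.lower "Salem" = "salem" := by decide
  have e6 : PySem.Str.lower "Montgomery" = "montgomery" := by decide
  have e7 : PySem.Str.lower "Trenton" = "trenton" := by decide
  have e8 : PySem.Str.lower "Denver" = "denver" := by decide
  have ht : pvTable = PySem.Dict.mk
      [("oregon","Salem is the capital of Oregon"),("salem","Salem is the capital of Oregon"),
       ("alabama","Montgomery is the capital of Alabama"),("montgomery","Montgomery is the capital of Alabama"),
       ("new jersey","Trenton is the capital of New Jersey"),("trenton","Trenton is the capital of New Jersey"),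
       ("colorado","Denver is the capital of Colorado"),("denver","Denver is the capital of Colorado")] := by decide
  by_cases h1 : "oregon" = PySem.Str.lower ws
  · simp [pvLoop1, pvStates, pvCaps, ht, e1, ← h1, PySem.Dict.getD, PySem.Dict.get?]
  by_cases h2 : "alabama" = PySem.Str.lower ws
  · simp [pvLoop1, pvStates, pvCaps, ht, e1, e2, ← h2, PySem.Dict.getD, PySem.Dict.get?]
  by_cases h3 : "new jersey" = PySem.Str.lower ws
  · simp [pvLoop1, pvStates, pvCaps, ht, e1, e2, e3, ← h3, PySem.Dict.getD, PySem.Dict.get?]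
  by_cases h4 : "colorado" = PySem.Str.lower ws
  · simp [pvLoop1, pvStates, pvCaps, ht, e1, e2, e3, e4, ← h4, PySem.Dict.getD, PySem.Dict.get?]
  by_cases h5 : "salem" = PySem.Str.lower ws
  · simp [pvLoop1, pvLoop2, pvInner, pvStates, pvCaps, ht, e1, e2, e3, e4, e5, ← h5, PySem.Dict.getD, PySem.Dict.get?]
  by_cases h6 : "montgomery" = PySem.Str.lower ws
  · simp [pvLoop1, pvLoop2, pvInner, pvStates, pvCaps, ht, e1, e2, e3, e4, e5, e6, ← h6, PySem.Dict.getD, PySem.Dict.get?]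
  by_cases h7 : "trenton" = PySem.Str.lower ws
  · simp [pvLoop1, pvLoop2, pvInner, pvStates, pvCaps, ht, e1, e2, e3, e4, e5, e6, e7, ← h7, PySem.Dict.getD, PySem.Dict.get?]
  by_cases h8 : "denver" = PySem.Str.lower ws
  · simp [pvLoop1, pvLoop2, pvInner, pvStates, pvCaps, ht, e1, e2, e3, e4, e5, e6, e7, e8, ← h8, PySem.Dict.getD, PySem.Dict.get?]
  simp [pvLoop1, pvLoop2, pvStates, pvCaps, ht, e1, e2, e3, e4, e5, e6, e7, e8, h1, h2, h3, h4, h5, h6, h7, h8, PySem.Dict.getD, PySem.Dict.get?]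


-- ===== VERDICT (by name: the statement is the Claim_ definition above) =====
theorem find_capital_spec : Claim_equal_find_capital := by
  intro w _
  unfold Spec_find_capital find_capital find_capital_alt
  by_cases h : PySem.Str.strip w = ""
  · simp [h]
  · simp only [if_neg h]
    exact pv_core_eq (PySem.Str.strip w)
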